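-- pv_equiv track=rewrite | github.com/Nilex-x/Zappy | src_client/ia/main.py | rmRedundantChar
-- ===== SOURCE A (Python) =====
-- def rmRedundantChar(srvMsg):
--     x = 'x'
--     res = ""
--     for i in srvMsg:
--         if not (i == ',' and x == ','):
--             res += i
--         else:
--             res += "empty,"
--         x = i
--     return res
-- ===== SOURCE B (Python) =====
-- def rmRedundantChar(srvMsg):
--     fields = srvMsg.split(',')
--     for i in range(1, len(fields) - 1):
--         if fields[i] == '':
--             fields[i] = 'empty'
--     return ','.join(fields)
-- ===== Notes on version B (the rewrite author's own statement) =====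
-- stated objective: simpler
-- what changed: Replaced the character-by-character scan carrying the previous character as state with a field-level decomposition: split on the comma, replace each interior empty field by the word empty, join back with commas.
import Mathlib
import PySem

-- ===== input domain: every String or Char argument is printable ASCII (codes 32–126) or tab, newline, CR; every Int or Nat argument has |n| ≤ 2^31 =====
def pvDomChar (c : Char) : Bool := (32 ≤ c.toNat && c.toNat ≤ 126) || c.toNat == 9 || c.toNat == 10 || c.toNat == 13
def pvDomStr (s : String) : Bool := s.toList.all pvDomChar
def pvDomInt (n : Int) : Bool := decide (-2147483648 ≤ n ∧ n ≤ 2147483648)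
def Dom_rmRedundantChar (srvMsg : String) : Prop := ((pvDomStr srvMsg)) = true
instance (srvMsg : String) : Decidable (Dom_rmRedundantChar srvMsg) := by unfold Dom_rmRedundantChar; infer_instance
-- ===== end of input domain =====

-- B replaces the character-by-character scan with prev-char state by split-on-comma /
-- fix interior empty fields / join (objective: simpler decomposition, same behaviour).

-- ===== PORT A =====
-- literal port: loop over the characters with state (x = previous char, res = accumulator)
def rmRedundantChar (srvMsg : String) : String :=
  let st := srvMsg.toList.foldl
    (fun (st : Char × List Char) i =>
      if ¬(i = ',' ∧ st.1 = ',') then (i, st.2 ++ [i]) else (i, st.2 ++ "empty,".toList))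
    ('x', [])
  String.mk st.2

-- ===== PORT B =====
-- the loop `for i in range(1, len(fields)-1): if fields[i]=='': fields[i]='empty'`:
-- first field kept, each interior empty field replaced, last field kept
def fixInterior : List (List Char) → List (List Char)
  | [] => []
  | [f] => [f]
  | f :: fs => (if f = [] then "empty".toList else f) :: fixInterior fs

def rmRedundantChar_alt (srvMsg : String) : String :=
  match srvMsg.toList.splitOn ',' with        -- srvMsg.split(',')
  | [] => ""                                  -- unreachable: splitOn is never []
  | f :: fs => String.mk (PySem.Chars.join [','] (f :: fixInterior fs))  -- ','.join(...)

-- ===== PRECONDITION & SPEC =====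
def Spec_rmRedundantChar (srvMsg : String) (out : String) : Prop := out = rmRedundantChar_alt srvMsg
instance (srvMsg : String) (out : String) : Decidable (Spec_rmRedundantChar srvMsg out) := by unfold Spec_rmRedundantChar; infer_instance

-- ===== CLAIM (what is proved, stated in full; the proofs are below) =====
def Claim_equal_rmRedundantChar : Prop := ∀ (srvMsg : String), Dom_rmRedundantChar srvMsg → Spec_rmRedundantChar srvMsg (rmRedundantChar srvMsg)

-- ===== LEMMAS AND PROOFS =====

-- A's loop body, isolated
def aStep (st : Char × List Char) (i : Char) : Char × List Char :=
  if ¬(i = ',' ∧ st.1 = ',') then (i, st.2 ++ [i]) else (i, st.2 ++ "empty,".toList)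

-- A's loop as structural recursion on the character list (state: previous char)
def aRun (x : Char) : List Char → List Char
  | [] => []
  | i :: rest =>
      (if ¬(i = ',' ∧ x = ',') then [i] else "empty,".toList) ++ aRun i rest

theorem foldl_aStep (ys : List Char) : ∀ (x : Char) (acc : List Char),
    (ys.foldl aStep (x, acc)).2 = acc ++ aRun x ys := by
  induction ys with
  | nil => intro x acc; simp [aRun]
  | cons i rest ih =>
      intro x acc
      by_cases h : i = ',' ∧ x = ','
      · simp [aStep, aRun, h, ih, List.append_assoc]
      · simp [aStep, aRun, h, ih, List.append_assoc]

-- the common field-level description: `render b fs` joins the fields with ',',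
-- replacing an empty field by "empty" exactly when a comma precedes it (b, or it is
-- not the first field) and a comma follows it (it is not the last field)
def render : Bool → List (List Char) → List Char
  | _, [] => []
  | _, [f] => f
  | b, f :: fs => (if f = [] ∧ b then "empty".toList else f) ++ ',' :: render true fs

theorem aRun_eq_render (ys : List Char) : ∀ x,
    aRun x ys = render (x = ',') (ys.splitOn ',') := by
  induction ys with
  | nil => intro x; simp [aRun, List.splitOn, List.splitOnP_nil, render]
  | cons c rest ih =>
      intro x
      by_cases hc : c = ','
      · subst hc
        have hsplit : (',' :: rest).splitOn ',' = [] :: rest.splitOn ',' := by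
          simp [List.splitOn, List.splitOnP_cons]
        rw [hsplit]
        obtain ⟨g, t, ht⟩ : ∃ g t, rest.splitOn ',' = g :: t := by
          cases h : rest.splitOn ',' with
          | nil => exact absurd h (List.splitOnP_ne_nil _ _)
          | cons g t => exact ⟨g, t, rfl⟩
        by_cases hx : x = ','
        · simp [aRun, hx, ih, ht, render]
        · simp [aRun, hx, ih, ht, render]
      · have hsplit : (c :: rest).splitOn ',' =
            ((rest.splitOn ',').modifyHead (List.cons c)) := by
          simp [List.splitOn, List.splitOnP_cons, hc]
        rw [hsplit]
        obtain ⟨g, t, ht⟩ : ∃ g t, rest.splitOn ',' = g :: t := by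
          cases h : rest.splitOn ',' with
          | nil => exact absurd h (List.splitOnP_ne_nil _ _)
          | cons g t => exact ⟨g, t, rfl⟩
        cases t with
        | nil => simp [aRun, hc, ih, ht, render]
        | cons t0 ts => simp [aRun, hc, ih, ht, render]

theorem render_true_eq_join (fs : List (List Char)) (hne : fs ≠ []) :
    render true fs = PySem.Chars.join [','] (fixInterior fs) := by
  induction fs with
  | nil => exact absurd rfl hne
  | cons g t ih =>
      cases t with
      | nil => simp [render, fixInterior, PySem.Chars.join_singleton]
      | cons t0 ts =>
          have h := ih (by simp)
          have hfix : fixInterior (g :: t0 :: ts) =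
              (if g = [] then "empty".toList else g) :: fixInterior (t0 :: ts) := rfl
          have hfx : fixInterior (t0 :: ts) ≠ [] := by
            cases ts <;> simp [fixInterior]
          obtain ⟨u, us, hu⟩ : ∃ u us, fixInterior (t0 :: ts) = u :: us := by
            cases hfi : fixInterior (t0 :: ts) with
            | nil => exact absurd hfi hfx
            | cons u us => exact ⟨u, us, rfl⟩
          rw [hfix, hu, PySem.Chars.join_cons_cons, ← hu, ← h]
          by_cases hg : g = [] <;> simp [render, hg, List.append_assoc]

theorem render_false_eq_join (f : List Char) (fs : List (List Char)) :
    render false (f :: fs) = PySem.Chars.join [','] (f :: fixInterior fs) := by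
  cases fs with
  | nil => simp [render, fixInterior, PySem.Chars.join_singleton]
  | cons g t =>
      have h := render_true_eq_join (g :: t) (by simp)
      obtain ⟨u, us, hu⟩ : ∃ u us, fixInterior (g :: t) = u :: us := by
        cases hfi : fixInterior (g :: t) with
        | nil => exact absurd hfi (by cases t <;> simp [fixInterior])
        | cons u us => exact ⟨u, us, rfl⟩
      rw [hu, PySem.Chars.join_cons_cons, ← hu, ← h]
      simp [render, List.append_assoc]

-- ===== VERDICT (by name: the statement is the Claim_ definition above) =====
theorem rmRedundantChar_spec : Claim_equal_rmRedundantChar := by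
  intro s _
  unfold Spec_rmRedundantChar rmRedundantChar rmRedundantChar_alt
  obtain ⟨f, fs, ht⟩ : ∃ f fs, s.toList.splitOn ',' = f :: fs := by
    cases h : s.toList.splitOn ',' with
    | nil => exact absurd h (List.splitOnP_ne_nil _ _)
    | cons f fs => exact ⟨f, fs, rfl⟩
  have hfold : (s.toList.foldl aStep ('x', [])).2 = aRun 'x' s.toList := by
    simpa using foldl_aStep s.toList 'x' []
  have hx : aRun 'x' s.toList = render false (s.toList.splitOn ',') := by
    simpa using aRun_eq_render s.toList 'x'
  simp only [ht]
  show String.mk (s.toList.foldl aStep ('x', [])).2 = _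
  rw [hfold, hx, ht, render_false_eq_join]
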